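-- pv_equiv track=rewrite | github.com/andrew-thompsonn/wordle_guesser | wordle.py | evaluateWord
-- ===== SOURCE A (Python) =====
-- def removeRepeatLetters(word):
--     return str("".join(set(word)))
--
-- def evaluateWord(counts, word):
--     letters = removeRepeatLetters(word)
--     score = 0
--     for letter in letters:
--         if letter not in counts.keys():
--             continue
--         score += counts[letter]
--     return score
-- ===== SOURCE B (Python) =====
-- def evaluateWord(counts, word):
--     wset = set(word)
--     return sum(count for letter, count in counts.items() if letter in wset)
-- ===== Notes on version B (the rewrite author's own statement) =====
-- stated objective: simpler
-- what changed: The loop is driven by counts.items() instead of the word's letters: word is turned into a set once and each (letter, count) pair contributes its count when the letter occurs in the word, replacing the dedup-then-lookup loop by a single filtered sum.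
import Mathlib
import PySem

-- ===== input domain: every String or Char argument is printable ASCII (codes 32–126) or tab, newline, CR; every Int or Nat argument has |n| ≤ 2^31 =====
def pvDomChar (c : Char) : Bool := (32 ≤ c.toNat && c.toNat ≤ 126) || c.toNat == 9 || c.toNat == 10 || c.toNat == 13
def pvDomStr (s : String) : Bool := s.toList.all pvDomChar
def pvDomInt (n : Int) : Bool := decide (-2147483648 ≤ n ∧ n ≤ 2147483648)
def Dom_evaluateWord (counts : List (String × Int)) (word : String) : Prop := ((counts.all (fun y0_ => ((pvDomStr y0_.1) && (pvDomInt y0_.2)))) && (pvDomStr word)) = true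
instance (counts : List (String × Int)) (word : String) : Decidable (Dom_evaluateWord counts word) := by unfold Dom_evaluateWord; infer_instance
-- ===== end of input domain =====

-- B drives the loop by counts.items() with the word turned into a set once, instead of
-- deduplicating the word and looking each letter up in the dict (objective: simpler).


-- ===== PORT A =====
-- letters = removeRepeatLetters(word): set(word) joined to a string; summing over it is
-- order-independent, so iterating the set in first-occurrence order is exact.
def evaluateWord (counts : List (String × Int)) (word : String) : Int :=
  let letters : List Char := PySem.Set.ofList word.toList
  letters.foldl
    (fun score letter =>
      if (counts.map Prod.fst).contains (String.ofList [letter]) = false then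
        score  -- continue
      else
        score + ((counts.find? (fun p => p.1 == String.ofList [letter])).map Prod.snd).getD 0)
    0

-- ===== PORT B =====
def evaluateWord_alt (counts : List (String × Int)) (word : String) : Int :=
  let wset : PySem.Set String := PySem.Set.ofList (word.toList.map (fun c => String.ofList [c]))
  ((counts.filter (fun p => wset.contains p.1)).map Prod.snd).sum

-- ===== PRECONDITION & SPEC =====
-- Pre_ excludes association lists with duplicate string keys: such lists do not represent
-- any Python dict (a dict collapses duplicate keys before either function runs), so the
-- first-match/every-match readings of the encoding are both accidental there.
def Pre_evaluateWord (counts : List (String × Int)) (word : String) : Prop :=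
  (counts.map Prod.fst).Nodup

instance (counts : List (String × Int)) (word : String) : Decidable (Pre_evaluateWord counts word) := by
  unfold Pre_evaluateWord; infer_instance

def pvWitness_evaluateWord : (List (String × Int)) × String := ([("a", 1), ("b", 2)], "ab")

def Spec_evaluateWord (counts : List (String × Int)) (word : String) (out : Int) : Prop := out = evaluateWord_alt counts word
instance (counts : List (String × Int)) (word : String) (out : Int) : Decidable (Spec_evaluateWord counts word out) := by unfold Spec_evaluateWord; infer_instance

-- ===== CLAIM (what is proved, stated in full; the proofs are below) =====
def Claim_equal_evaluateWord : Prop := ∀ (counts : List (String × Int)) (word : String), Dom_evaluateWord counts word → Pre_evaluateWord counts word → Spec_evaluateWord counts word (evaluateWord counts word)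

-- ===== LEMMAS AND PROOFS =====

-- first-match lookup with default 0 (proof-side characterisation of A's guarded dict access)
def lkp : List (String × Int) → String → Int
  | [], _ => 0
  | (k, v) :: t, s => if k = s then v else lkp t s

theorem lkp_eq_find? (t : List (String × Int)) (s : String) :
    lkp t s = ((t.find? (fun p => p.1 == s)).map Prod.snd).getD 0 := by
  induction t with
  | nil => rfl
  | cons p t ih =>
    obtain ⟨k, v⟩ := p
    by_cases h : k = s
    · simp [lkp, List.find?, h]
    · have hb : (k == s) = false := by simp [h]
      simp [lkp, List.find?, h, hb, ih]

theorem lkp_of_not_contains (t : List (String × Int)) (s : String)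
    (h : (t.map Prod.fst).contains s = false) : lkp t s = 0 := by
  induction t with
  | nil => rfl
  | cons p t ih =>
    obtain ⟨k, v⟩ := p
    simp only [List.map_cons, List.contains_cons, Bool.or_eq_false_iff, beq_eq_false_iff_ne] at h
    simp only [lkp]
    rw [if_neg (fun hh => h.1 hh.symm)]
    exact ih h.2

-- A's fold is the sum of the per-letter lookups
theorem foldA_eq_sum (counts : List (String × Int)) (L : List Char) (s0 : Int) :
    L.foldl
      (fun score letter =>
        if (counts.map Prod.fst).contains (String.ofList [letter]) = false then score
        else score + ((counts.find? (fun p => p.1 == String.ofList [letter])).map Prod.snd).getD 0)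
      s0
    = s0 + (L.map (fun c => lkp counts (String.ofList [c]))).sum := by
  induction L generalizing s0 with
  | nil => simp
  | cons c L ih =>
    simp only [List.foldl_cons, List.map_cons, List.sum_cons, ih]
    by_cases h : (counts.map Prod.fst).contains (String.ofList [c]) = false
    · rw [if_pos h, lkp_of_not_contains counts _ h]; ring
    · rw [if_neg h, lkp_eq_find?]; ring

theorem ofList_one_inj {c c' : Char} (h : String.ofList [c] = String.ofList [c']) : c = c' := by
  simpa using congrArg String.toList h

-- B's filtered sum is the sum of if-guarded values
theorem sumB_eq (counts : List (String × Int)) (W : List String) :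
    ((counts.filter (fun p => W.contains p.1)).map Prod.snd).sum
    = (counts.map (fun p => if p.1 ∈ W then p.2 else (0 : Int))).sum := by
  simp only [List.contains_eq_mem]
  induction counts with
  | nil => rfl
  | cons p t ih =>
    by_cases h : p.1 ∈ W <;> simp [h, ih]

-- splitting one key out of the letter-indexed sum
theorem sum_split (t : List (String × Int)) (k : String) (v : Int) (L : List Char)
    (hnd : L.Nodup)
    (hz : (t.map Prod.fst).contains k = false) :
    (L.map (fun c => if k = String.ofList [c] then v else lkp t (String.ofList [c]))).sum
    = (if k ∈ L.map (fun c => String.ofList [c]) then v else 0)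
      + (L.map (fun c => lkp t (String.ofList [c]))).sum := by
  induction L with
  | nil => simp
  | cons c L ih =>
    have hnd' : L.Nodup := hnd.of_cons
    by_cases h : k = String.ofList [c]
    · -- no other c' ∈ L maps to k (injectivity + nodup), and lkp t k = 0
      have hk : k ∉ L.map (fun c => String.ofList [c]) := by
        intro hmem
        obtain ⟨c', hc', he⟩ := List.mem_map.mp hmem
        have : c = c' := ofList_one_inj (h ▸ he.symm)
        exact (List.nodup_cons.mp hnd).1 (this ▸ hc')
      have hz0 : lkp t (String.ofList [c]) = 0 := lkp_of_not_contains t _ (h ▸ hz)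
      have hrest : (L.map (fun c => if k = String.ofList [c] then v else lkp t (String.ofList [c]))).sum
           = (L.map (fun c => lkp t (String.ofList [c]))).sum := by
        apply congrArg List.sum
        apply List.map_congr_left
        intro x hx
        have hne : ¬ k = String.ofList [x] := fun he => hk (List.mem_map.mpr ⟨x, hx, he.symm⟩)
        simp [hne]
      have hmem : k ∈ String.ofList [c] :: L.map (fun c => String.ofList [c]) :=
        List.mem_cons.mpr (Or.inl h)
      simp only [List.map_cons, List.sum_cons, if_pos h, hrest, hz0, zero_add, if_pos hmem]
    · have hmem : (k ∈ String.ofList [c] :: L.map (fun c => String.ofList [c]))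
                ↔ k ∈ L.map (fun c => String.ofList [c]) := by
        simp [List.mem_cons, h]
      simp only [List.map_cons, List.sum_cons, if_neg h, ih hnd', hmem]
      ring

-- the central exchange: sum over distinct letters of the lookup = sum over pairs with key among the letters
theorem exchange (counts : List (String × Int)) (L : List Char) (hL : L.Nodup)
    (hnd : (counts.map Prod.fst).Nodup) :
    (L.map (fun c => lkp counts (String.ofList [c]))).sum
    = (counts.map (fun p => if p.1 ∈ L.map (fun c => String.ofList [c]) then p.2 else (0 : Int))).sum := by
  induction counts with
  | nil => simp [lkp]
  | cons p t ih =>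
    obtain ⟨k, v⟩ := p
    simp only [List.map_cons, List.nodup_cons] at hnd
    have hz : (t.map Prod.fst).contains k = false := by
      simp only [List.contains_eq_mem, decide_eq_false_iff_not]
      exact hnd.1
    simp only [lkp, List.map_cons, List.sum_cons]
    rw [sum_split t k v L hL hz, ih hnd.2]

-- ===== VERDICT (by name: the statement is the Claim_ definition above) =====
theorem evaluateWord_spec : Claim_equal_evaluateWord := by
  intro counts word _ hpre
  unfold Spec_evaluateWord evaluateWord evaluateWord_alt
  show _ = ((counts.filter (fun p =>
      List.contains (PySem.Set.ofList (word.toList.map (fun c => String.ofList [c]))) p.1)).map Prod.snd).sum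
  rw [foldA_eq_sum, sumB_eq, zero_add,
    exchange counts (PySem.Set.ofList word.toList) (PySem.Set.nodup_ofList word.toList) hpre]
  apply congrArg List.sum
  apply List.map_congr_left
  intro p _
  have hiff : (p.1 ∈ (PySem.Set.ofList word.toList).map (fun c => String.ofList [c]))
       ↔ (p.1 ∈ PySem.Set.ofList (word.toList.map (fun c => String.ofList [c]))) := by
    simp [List.mem_map, PySem.Set.mem_ofList]
  simp only [hiff]
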